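-- pv_equiv track=rewrite | github.com/burd5/codewars_python | obtain_max_number.py | obtain_max_number
-- ===== SOURCE A (Python) =====
-- def obtain_max_number(arr):
--     last_len = 0
--     while len(arr) != last_len:
--         last_len = len(arr)
--         for n in arr:
--             if arr.count(n) > 1:
--                 arr.remove(n)
--                 arr.remove(n)
--                 arr.append(n*2)
--
--     return max(arr)
-- ===== SOURCE B (Python) =====
-- def obtain_max_number(arr):
--     # One pass: bucket values by their odd part; merging two equal v into 2v
--     # preserves each bucket's sum m*T, so the stable (duplicate-free) state per
--     # bucket is the binary representation of T, whose maximal element is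
--     # m * (highest power of 2 <= T) for m > 0 and m * (lowest set bit of T) for m < 0.
--     weights = {}
--     has_zero = False
--     for v in arr:
--         if v == 0:
--             has_zero = True
--         else:
--             m = v
--             while m % 2 == 0:
--                 m //= 2
--             weights[m] = weights.get(m, 0) + v // m
--     best = None
--     if has_zero:
--         best = 0
--     for m, t in weights.items():
--         if m > 0:
--             p = 1
--             while 2 * p <= t:
--                 p *= 2
--         else:
--             p = 1
--             while t % (2 * p) == 0:
--                 p *= 2
--         val = m * p
--         if best is None or val > best:
--             best = val
--     return best
-- ===== Notes on version B (the rewrite author's own statement) =====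
-- stated objective: faster
-- what changed: A repeatedly scans/mutates the list (count/remove/remove/append) until the length stabilises and then takes max; B makes one pass bucketing values by odd part (summing their power-of-two multiples, which merging preserves) and computes each bucket's stable maximum directly via a power-of-two scan, handling zero with a flag.
-- outside the precondition, e.g. on obtain_max_number([]): A raises ValueError, B returns None
import Mathlib
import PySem

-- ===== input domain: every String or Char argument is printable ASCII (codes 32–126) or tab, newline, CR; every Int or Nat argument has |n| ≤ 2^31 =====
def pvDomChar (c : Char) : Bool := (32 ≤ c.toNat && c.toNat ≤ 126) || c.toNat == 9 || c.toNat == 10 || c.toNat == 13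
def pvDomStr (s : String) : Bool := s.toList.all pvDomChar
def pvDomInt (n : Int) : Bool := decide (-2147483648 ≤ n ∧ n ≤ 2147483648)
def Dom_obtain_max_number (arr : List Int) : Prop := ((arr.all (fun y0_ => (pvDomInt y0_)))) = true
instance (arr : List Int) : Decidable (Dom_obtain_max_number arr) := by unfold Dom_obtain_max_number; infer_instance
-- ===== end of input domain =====

-- B replaces A's cubic remove/append fixpoint by one bucketing pass (odd part ↦ sum of the
-- 2-power multiples) plus a per-bucket power-of-two scan; return values agree on nonempty
-- input. NOTE: Python A mutates its argument list in place, B does not; the equivalence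
-- proved here is about the RETURN value only.

-- ===== PORT A =====
-- arr.remove(n) in total form; at both call sites the guard 'arr.count(n) > 1' ensures n ∈ arr
def pvRemove (arr : List Int) (n : Int) : List Int := (PySem.List.remove? arr n).getD arr

-- 'for n in arr' over a list mutated in the loop body: Python's list iterator reads arr[i]
-- for i = 0, 1, … from the CURRENT list and stops when i ≥ len(arr).  The fuel argument is
-- a termination guard only: the list shrinks at every merge, so arr.length - i bounds the
-- remaining iterations and the fuel-0 branch is never reached from obtain_max_number.
def pvPass : Nat → List Int → Nat → List Int
  | 0, arr, _ => arr
  | fuel + 1, arr, i =>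
    if h : i < arr.length then
      if 1 < PySem.List.count arr arr[i] then
        pvPass fuel (pvRemove (pvRemove arr arr[i]) arr[i] ++ [arr[i] * 2]) (i + 1)
      else
        pvPass fuel arr (i + 1)
    else arr

-- while len(arr) != last_len; each pass either shrinks the list or is the last one, so
-- arr.length + 1 passes always suffice and the fuel-0 branch is never reached
def pvWhile : Nat → List Int → Int → List Int
  | 0, arr, _ => arr
  | fuel + 1, arr, last_len =>
    if (arr.length : Int) ≠ last_len then
      pvWhile fuel (pvPass arr.length arr 0) arr.length
    else arr

def obtain_max_number (arr : List Int) : Int :=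
  -- max(arr) on the final list; .getD 0 is never the ValueError case under Pre_ (arr ≠ [])
  (PySem.List.max? (pvWhile (arr.length + 1) arr 0) (fun x => x)).getD 0

-- ===== PORT B =====
-- while m % 2 == 0: m //= 2  (fuel |v| is a termination guard only: Source B reaches this loop
-- only with v ≠ 0, and halving a nonzero v terminates within |v| steps)
def pvOddPartAux : Nat → Int → Int
  | 0, m => m
  | fuel + 1, m => if PySem.Int.mod m 2 = 0 then pvOddPartAux fuel (PySem.Int.floordiv m 2) else m

def pvOddPart (v : Int) : Int := pvOddPartAux v.natAbs v

def pvTally (st : PySem.Dict Int Int × Bool) (v : Int) : PySem.Dict Int Int × Bool :=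
  if v = 0 then (st.1, true)
  else
    let m := pvOddPart v
    (st.1.insert m (st.1.getD m 0 + PySem.Int.floordiv v m), st.2)

-- p = 1; while 2 * p <= t: p *= 2  (fuel |t| + 1 is a termination guard only: p doubles from 1)
def pvHiPowAux : Nat → Int → Int → Int
  | 0, p, _ => p
  | fuel + 1, p, t => if 2 * p ≤ t then pvHiPowAux fuel (2 * p) t else p

def pvHiPow (p t : Int) : Int := pvHiPowAux (t.natAbs + 1) p t

-- p = 1; while t % (2 * p) == 0: p *= 2  (fuel |t| + 1 is a termination guard only:
-- Source B reaches this loop only with t ≥ 1, and then 2 * p ∣ t forces 2 * p ≤ t)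
def pvLoPowAux : Nat → Int → Int → Int
  | 0, p, _ => p
  | fuel + 1, p, t => if PySem.Int.mod t (2 * p) = 0 then pvLoPowAux fuel (2 * p) t else p

def pvLoPow (p t : Int) : Int := pvLoPowAux (t.natAbs + 1) p t

def pvBestStep (best : Option Int) (mt : Int × Int) : Option Int :=
  let p := if 0 < mt.1 then pvHiPow 1 mt.2 else pvLoPow 1 mt.2
  let val := mt.1 * p
  match best with
  | none => some val
  | some b => if b < val then some val else some b

def obtain_max_number_alt (arr : List Int) : Int :=
  let st := arr.foldl pvTally (PySem.Dict.empty, false)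
  let best0 : Option Int := if st.2 then some 0 else none
  let best := st.1.items.foldl pvBestStep best0
  -- 'return best'; .getD 0 is never the None case under Pre_ (arr ≠ [])
  best.getD 0


-- ===== PRECONDITION & SPEC =====
-- Pre_ excludes only the empty list, on which Python A raises ValueError (max of empty sequence)
def Pre_obtain_max_number (arr : List Int) : Prop := arr ≠ []
instance (arr : List Int) : Decidable (Pre_obtain_max_number arr) := by unfold Pre_obtain_max_number; infer_instance
def pvWitness_obtain_max_number : List Int := [6, -6, 6, 0, 5]
def Spec_obtain_max_number (arr : List Int) (out : Int) : Prop := out = obtain_max_number_alt arr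
instance (arr : List Int) (out : Int) : Decidable (Spec_obtain_max_number arr out) := by unfold Spec_obtain_max_number; infer_instance

-- ===== CLAIM (what is proved, stated in full; the proofs are below) =====
def Claim_equal_obtain_max_number : Prop := ∀ (arr : List Int), Dom_obtain_max_number arr → Pre_obtain_max_number arr → Spec_obtain_max_number arr (obtain_max_number arr)

-- ===== LEMMAS AND PROOFS =====
-- ===== proof layer: A side =====
theorem pvRemove_eq_erase {arr : List Int} {n : Int} (h : n ∈ arr) :
    pvRemove arr n = arr.erase n := by
  simp [pvRemove, PySem.List.remove?_eq_some_erase arr n h]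

theorem pvRemove_length {arr : List Int} {n : Int} (h : n ∈ arr) :
    (pvRemove arr n).length = arr.length - 1 := by
  rw [pvRemove_eq_erase h, List.length_erase_of_mem h]

theorem mem_pvRemove_of_count {arr : List Int} {n : Int} (h : 1 < PySem.List.count arr n) :
    n ∈ pvRemove arr n := by
  have hm : n ∈ arr := by
    rw [PySem.List.count_eq] at h
    exact List.count_pos_iff.mp (by omega)
  rw [pvRemove_eq_erase hm, ← List.count_pos_iff, List.count_erase_self]
  rw [PySem.List.count_eq] at h; omega

theorem mergeLen {arr : List Int} {n : Int} (h : 1 < PySem.List.count arr n) :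
    (pvRemove (pvRemove arr n) n ++ [n * 2]).length = arr.length - 1 := by
  have hm : n ∈ arr := by
    rw [PySem.List.count_eq] at h
    exact List.count_pos_iff.mp (by omega)
  have h2 := mem_pvRemove_of_count h
  have l1 := pvRemove_length hm
  have l2 := pvRemove_length h2
  have : 0 < arr.length := List.length_pos_of_mem hm
  have : 0 < (pvRemove arr n).length := List.length_pos_of_mem h2
  simp [List.length_append, l2, l1]; omega

def pvMerge (arr : List Int) (n : Int) : List Int := pvRemove (pvRemove arr n) n ++ [n * 2]

def classSum (arr : List Int) (m : Int) : Int := (arr.filter (fun v => pvOddPart v == m)).sum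

theorem count_mem {arr : List Int} {n : Int} (h : 1 < PySem.List.count arr n) : n ∈ arr := by
  rw [PySem.List.count_eq] at h
  exact List.count_pos_iff.mp (by omega)

theorem perm_merge {arr : List Int} {n : Int} (h : 1 < PySem.List.count arr n) :
    (pvMerge arr n).Perm (n * 2 :: ((arr.erase n).erase n)) := by
  have hm : n ∈ arr := count_mem h
  have h2 := mem_pvRemove_of_count h
  rw [pvMerge, pvRemove_eq_erase hm] at *
  rw [pvRemove_eq_erase h2]
  exact List.perm_append_singleton _ _

theorem perm_self {arr : List Int} {n : Int} (h : 1 < PySem.List.count arr n) :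
    arr.Perm (n :: n :: ((arr.erase n).erase n)) := by
  have hm : n ∈ arr := count_mem h
  have h2 : n ∈ arr.erase n := by rw [← pvRemove_eq_erase hm]; exact mem_pvRemove_of_count h
  have p1 := List.perm_cons_erase hm
  have p2 := List.perm_cons_erase h2
  exact p1.trans (p2.cons n)

theorem oddPartAux_zero : ∀ fuel : Nat, pvOddPartAux fuel 0 = 0 := by
  intro fuel
  induction fuel with
  | zero => rfl
  | succ f ih =>
    rw [pvOddPartAux]
    have h1 : PySem.Int.mod 0 2 = 0 := by decide
    have h2 : PySem.Int.floordiv 0 2 = 0 := by decide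
    rw [h1, if_pos rfl, h2, ih]

theorem half_natAbs_lt {v : Int} (h0 : v ≠ 0) (h2 : (2:Int) ∣ v) :
    (PySem.Int.floordiv v 2).natAbs < v.natAbs := by
  obtain ⟨k, rfl⟩ := h2
  rw [PySem.Int.floordiv_eq_ediv_of_pos (by omega), Int.mul_ediv_cancel_left _ (by omega)]
  omega

theorem oddPartAux_congr : ∀ (f1 f2 : Nat) (v : Int), v.natAbs ≤ f1 → v.natAbs ≤ f2 →
    pvOddPartAux f1 v = pvOddPartAux f2 v := by
  intro f1
  induction f1 with
  | zero =>
    intro f2 v h1 _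
    have hv : v = 0 := by omega
    subst hv
    rw [oddPartAux_zero, oddPartAux_zero]
  | succ f ih =>
    intro f2 v h1 h2
    by_cases hv : v = 0
    · subst hv; rw [oddPartAux_zero, oddPartAux_zero]
    · cases f2 with
      | zero => omega
      | succ g =>
        rw [pvOddPartAux, pvOddPartAux]
        by_cases hm : PySem.Int.mod v 2 = 0
        · rw [if_pos hm, if_pos hm]
          have hlt := half_natAbs_lt hv ((PySem.Int.mod_eq_zero_iff_dvd v 2).mp hm)
          exact ih _ _ (by omega) (by omega)
        · rw [if_neg hm, if_neg hm]

theorem oddPart_unfold (v : Int) :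
    pvOddPart v = if PySem.Int.mod v 2 = 0 then pvOddPart (PySem.Int.floordiv v 2) else v := by
  by_cases hv : v = 0
  · subst hv
    have h1 : PySem.Int.mod 0 2 = 0 := by decide
    have h2 : PySem.Int.floordiv 0 2 = 0 := by decide
    rw [h1, if_pos rfl, h2]
  · have hpos : 0 < v.natAbs := by omega
    obtain ⟨n, hn⟩ : ∃ n, v.natAbs = n + 1 := ⟨v.natAbs - 1, by omega⟩
    rw [pvOddPart, hn, pvOddPartAux]
    by_cases hm : PySem.Int.mod v 2 = 0
    · rw [if_pos hm, if_pos hm, pvOddPart]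
      have hlt := half_natAbs_lt hv ((PySem.Int.mod_eq_zero_iff_dvd v 2).mp hm)
      exact oddPartAux_congr _ _ _ (by omega) (le_refl _)
    · rw [if_neg hm, if_neg hm]

theorem oddPart_two_mul (n : Int) : pvOddPart (n * 2) = pvOddPart n := by
  by_cases h0 : n = 0
  · subst h0; norm_num
  · rw [oddPart_unfold (n * 2)]
    have hm : PySem.Int.mod (n * 2) 2 = 0 := (PySem.Int.mod_eq_zero_iff_dvd _ 2).mpr ⟨n, by ring⟩
    have hd : PySem.Int.floordiv (n * 2) 2 = n := by
      rw [PySem.Int.floordiv_eq_ediv_of_pos (by omega), Int.mul_ediv_cancel _ (by omega)]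
    rw [if_pos hm, hd]

theorem classSum_perm {a b : List Int} (h : a.Perm b) (m : Int) : classSum a m = classSum b m :=
  List.Perm.sum_eq (h.filter _)

theorem classSum_merge {arr : List Int} {n : Int} (h : 1 < PySem.List.count arr n) (m : Int) :
    classSum (pvMerge arr n) m = classSum arr m := by
  rw [classSum_perm (perm_merge h) m, classSum_perm (perm_self h) m]
  simp only [classSum, List.filter_cons, oddPart_two_mul]
  split <;> simp <;> ring

theorem zeroMem_merge {arr : List Int} {n : Int} (h : 1 < PySem.List.count arr n) :
    0 ∈ pvMerge arr n ↔ 0 ∈ arr := by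
  rw [(perm_merge h).mem_iff, (perm_self h).mem_iff]
  simp only [List.mem_cons]
  constructor
  · rintro (h2 | h2)
    · left; omega
    · tauto
  · rintro (h2 | h2 | h2)
    · left; omega
    · left; omega
    · tauto

theorem merge_ne_nil (arr : List Int) (n : Int) : pvMerge arr n ≠ [] := by
  simp [pvMerge]

theorem pvPass_length_le : ∀ (fuel : Nat) (arr : List Int) (i : Nat),
    (pvPass fuel arr i).length ≤ arr.length := by
  intro fuel
  induction fuel with
  | zero => intro arr i; exact le_refl _
  | succ f ih =>
    intro arr i
    rw [pvPass]
    split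
    next h =>
      by_cases hc : 1 < PySem.List.count arr arr[i]
      · rw [if_pos hc]
        have h2 := mergeLen hc
        have h3 := ih (pvRemove (pvRemove arr arr[i]) arr[i] ++ [arr[i] * 2]) (i + 1)
        omega
      · rw [if_neg hc]
        exact ih arr (i + 1)
    next h => exact le_refl _

theorem pvPass_pres (P : List Int → Prop)
    (hP : ∀ a n, 1 < PySem.List.count a n → P a → P (pvMerge a n)) :
    ∀ (fuel : Nat) (arr : List Int) (i : Nat), P arr → P (pvPass fuel arr i) := by
  intro fuel
  induction fuel with
  | zero => intro arr i h; exact h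
  | succ f ih =>
    intro arr i h
    rw [pvPass]
    split
    next hlt =>
      by_cases hc : 1 < PySem.List.count arr arr[i]
      · rw [if_pos hc]
        exact ih _ _ (hP arr arr[i] hc h)
      · rw [if_neg hc]
        exact ih _ _ h
    next hlt => exact h

theorem pvWhile_pres (P : List Int → Prop)
    (hP : ∀ a n, 1 < PySem.List.count a n → P a → P (pvMerge a n)) :
    ∀ (fuel : Nat) (arr : List Int) (l : Int), P arr → P (pvWhile fuel arr l) := by
  intro fuel
  induction fuel with
  | zero => intro arr l h; exact h
  | succ f ih =>
    intro arr l h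
    rw [pvWhile]
    split
    next hne => exact ih _ _ (pvPass_pres P hP _ arr 0 h)
    next hne => exact h

theorem pvPass_eq_of_length : ∀ (fuel : Nat) (arr : List Int) (i : Nat),
    (pvPass fuel arr i).length = arr.length → pvPass fuel arr i = arr := by
  intro fuel
  induction fuel with
  | zero => intro arr i _; rfl
  | succ f ih =>
    intro arr i h
    by_cases hlt : i < arr.length
    · rw [pvPass, dif_pos hlt] at h ⊢
      by_cases hc : 1 < PySem.List.count arr arr[i]
      · rw [if_pos hc] at h
        exfalso
        have h1 := pvPass_length_le f (pvRemove (pvRemove arr arr[i]) arr[i] ++ [arr[i] * 2]) (i + 1)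
        have h2 := mergeLen hc
        omega
      · rw [if_neg hc] at h ⊢
        exact ih _ _ h
    · rw [pvPass, dif_neg hlt]

theorem pvPass_progress : ∀ (fuel : Nat) (arr : List Int) (i : Nat), arr.length ≤ fuel + i →
    (∃ j, ∃ (hj : j < arr.length), i ≤ j ∧ 1 < PySem.List.count arr arr[j]) →
    (pvPass fuel arr i).length < arr.length := by
  intro fuel
  induction fuel with
  | zero =>
    intro arr i hf h
    obtain ⟨j, hj, hij, _⟩ := h
    omega
  | succ f ih =>
    intro arr i hf h
    obtain ⟨j, hj, hij, hcj⟩ := h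
    have hlt : i < arr.length := by omega
    rw [pvPass, dif_pos hlt]
    by_cases hc : 1 < PySem.List.count arr arr[i]
    · rw [if_pos hc]
      have h1 := pvPass_length_le f (pvRemove (pvRemove arr arr[i]) arr[i] ++ [arr[i] * 2]) (i + 1)
      have h2 := mergeLen hc
      omega
    · rw [if_neg hc]
      apply ih arr (i + 1) (by omega)
      have hne : j ≠ i := by
        intro he
        subst he
        exact hc hcj
      exact ⟨j, hj, by omega, hcj⟩

theorem nodup_of_no_progress {arr : List Int}
    (h : (pvPass arr.length arr 0).length = arr.length) (n : Int) : List.count n arr ≤ 1 := by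
  by_contra hc
  have : (pvPass arr.length arr 0).length < arr.length := by
    apply pvPass_progress arr.length arr 0 (by omega)
    have hm : n ∈ arr := List.count_pos_iff.mp (by omega)
    obtain ⟨j, hj, rfl⟩ := List.mem_iff_getElem.mp hm
    exact ⟨j, hj, Nat.zero_le j, by rw [PySem.List.count_eq]; omega⟩
  omega

theorem pvWhile_self (fuel : Nat) (arr : List Int) : pvWhile fuel arr arr.length = arr := by
  cases fuel with
  | zero => rfl
  | succ f => rw [pvWhile, if_neg (by simp)]

theorem pvWhile_count_le : ∀ (fuel : Nat) (arr : List Int) (l : Int), arr.length + 1 ≤ fuel →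
    (arr.length : Int) ≠ l → ∀ n, List.count n (pvWhile fuel arr l) ≤ 1 := by
  intro fuel
  induction fuel with
  | zero => intro arr l hf; exact absurd hf (by omega)
  | succ f ih =>
    intro arr l hf hne n
    rw [pvWhile, if_pos hne]
    by_cases he : (pvPass arr.length arr 0).length = arr.length
    · have hfix : pvPass arr.length arr 0 = arr := pvPass_eq_of_length _ _ _ he
      rw [hfix, pvWhile_self]
      exact nodup_of_no_progress he n
    · have hle := pvPass_length_le arr.length arr 0
      have hlt : (pvPass arr.length arr 0).length < arr.length := lt_of_le_of_ne hle he
      apply ih _ _ (by omega) (by exact_mod_cast he) n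

theorem A_characterization {arr : List Int} (h : arr ≠ []) :
    pvWhile (arr.length + 1) arr 0 ≠ [] ∧
    (∀ m, classSum (pvWhile (arr.length + 1) arr 0) m = classSum arr m) ∧
    ((0:Int) ∈ pvWhile (arr.length + 1) arr 0 ↔ (0:Int) ∈ arr) ∧
    (∀ n, List.count n (pvWhile (arr.length + 1) arr 0) ≤ 1) ∧
    obtain_max_number arr = (PySem.List.max? (pvWhile (arr.length + 1) arr 0) (fun x => x)).getD 0 := by
  have hlen : ((arr.length : Nat) : Int) ≠ (0:Int) := by
    have := List.length_pos_of_ne_nil h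
    omega
  refine ⟨?_, ?_, ?_, pvWhile_count_le (arr.length + 1) arr 0 (le_refl _) hlen, rfl⟩
  · exact pvWhile_pres (fun a => a ≠ []) (fun a n _ _ => merge_ne_nil a n) _ arr 0 h
  · intro m
    exact pvWhile_pres (fun a => classSum a m = classSum arr m)
      (fun a n hc hp => (classSum_merge hc m).trans hp) _ arr 0 rfl
  · exact pvWhile_pres (fun a => ((0:Int) ∈ a ↔ (0:Int) ∈ arr))
      (fun a n hc hp => (zeroMem_merge hc).trans hp) _ arr 0 Iff.rfl

-- ===== proof layer: B side =====
def pvIns (d : PySem.Dict Int Int) (v : Int) : PySem.Dict Int Int :=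
  d.insert (pvOddPart v) (d.getD (pvOddPart v) 0 + PySem.Int.floordiv v (pvOddPart v))

theorem foldl_pvTally (l : List Int) (d : PySem.Dict Int Int) (b : Bool) :
    l.foldl pvTally (d, b) =
      (l.foldl (fun d v => if v = 0 then d else pvIns d v) d,
       b || l.any (fun v => v == 0)) := by
  induction l generalizing d b with
  | nil => simp
  | cons x t ih =>
    simp only [List.foldl_cons, List.any_cons]
    by_cases hx : x = 0
    · subst hx
      rw [show pvTally (d, b) 0 = (d, true) by simp [pvTally], ih]
      simp
    · rw [show pvTally (d, b) x = (pvIns d x, b) by simp [pvTally, pvIns, hx], ih]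
      have hb : (x == 0) = false := by simp [hx]
      rw [hb, if_neg hx]
      simp
theorem foldl_ite_filter (l : List Int) (d : PySem.Dict Int Int) :

    l.foldl (fun d v => if v = 0 then d else pvIns d v) d =
      (l.filter (fun v => !(v == 0))).foldl pvIns d := by
  induction l generalizing d with
  | nil => rfl
  | cons x t ih =>
    by_cases hx : x = 0
    · subst hx; simp [ih]
    · simp [hx, ih]

theorem getD_foldl_pvIns (l : List Int) (d : PySem.Dict Int Int) (m : Int) :
    (l.foldl pvIns d).getD m 0 =
      d.getD m 0 + ((l.filter (fun v => pvOddPart v == m)).map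
        (fun v => PySem.Int.floordiv v (pvOddPart v))).sum := by
  induction l generalizing d with
  | nil => simp
  | cons x t ih =>
    simp only [List.foldl_cons, List.filter_cons]
    rw [ih]
    by_cases hx : pvOddPart x = m
    · simp only [hx, beq_self_eq_true, if_pos]
      rw [pvIns, PySem.Dict.getD_insert]
      simp [hx]
      ring
    · have : (pvOddPart x == m) = false := by simp [hx]
      rw [this]
      simp only [Bool.false_eq_true, if_false]
      rw [pvIns, PySem.Dict.getD_insert]
      simp [Ne.symm hx]

theorem keys_foldl_pvIns (l : List Int) :
    (l.foldl pvIns PySem.Dict.empty).keys = PySem.Set.ofList (l.map pvOddPart) := by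
  rw [show pvIns = (fun d v => d.insert (pvOddPart v)
    ((fun (d : PySem.Dict Int Int) v => d.getD (pvOddPart v) 0 + PySem.Int.floordiv v (pvOddPart v)) d v)) from rfl,
    PySem.Dict.keys_foldl_insert_key]
  simp [PySem.Dict.keys, PySem.Dict.empty, PySem.Set.update_nil_left]

theorem nodup_keys_foldl_pvIns (l : List Int) :
    (l.foldl pvIns PySem.Dict.empty).keys.Nodup := by
  rw [keys_foldl_pvIns]
  exact PySem.Set.nodup_ofList _

-- ===== proof layer: odd part / exponent arithmetic =====
def pvExp (v : Int) : Nat :=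
  if h : v ≠ 0 ∧ PySem.Int.mod v 2 = 0 then pvExp (PySem.Int.floordiv v 2) + 1 else 0
termination_by v.natAbs
decreasing_by
  obtain ⟨h0, h2⟩ := h
  obtain ⟨k, rfl⟩ := (PySem.Int.mod_eq_zero_iff_dvd v 2).mp h2
  rw [PySem.Int.floordiv_eq_ediv_of_pos (by omega), Int.mul_ediv_cancel_left _ (by omega)]
  omega

theorem oddPart_exp (v : Int) : v = pvOddPart v * 2 ^ (pvExp v) := by
  fun_induction pvExp with
  | case1 v h ih =>
    obtain ⟨h0, h2⟩ := h
    rw [oddPart_unfold v, if_pos h2]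
    obtain ⟨k, rfl⟩ := (PySem.Int.mod_eq_zero_iff_dvd v 2).mp h2
    have hd : PySem.Int.floordiv (2 * k) 2 = k := by
      rw [PySem.Int.floordiv_eq_ediv_of_pos (by omega), Int.mul_ediv_cancel_left _ (by omega)]
    rw [hd] at ih ⊢
    rw [pow_succ]
    rw [← mul_assoc, ← ih]
    ring
  | case2 v h =>
    by_cases h0 : v = 0
    · subst h0
      rw [pvOddPart, oddPartAux_zero]
      ring
    · have hm : PySem.Int.mod v 2 ≠ 0 := fun hc => h ⟨h0, hc⟩
      rw [oddPart_unfold v, if_neg hm]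
      ring

theorem oddPart_ne_zero {v : Int} (h : v ≠ 0) : pvOddPart v ≠ 0 := by
  intro h0
  apply h
  have := oddPart_exp v
  rw [h0] at this
  simpa using this

theorem oddPart_zero : pvOddPart 0 = 0 := by rw [pvOddPart, oddPartAux_zero]

-- the class of odd part m inside a list
def pvClass (l : List Int) (m : Int) : List Int := l.filter (fun v => pvOddPart v == m)

theorem mem_pvClass {l : List Int} {m v : Int} :
    v ∈ pvClass l m ↔ v ∈ l ∧ pvOddPart v = m := by
  simp [pvClass]

theorem mem_pvClass_rep {l : List Int} {m v : Int} (hm : m ≠ 0) (h : v ∈ pvClass l m) :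
    v = m * 2 ^ (pvExp v) ∧ v ≠ 0 := by
  obtain ⟨_, hop⟩ := mem_pvClass.mp h
  have hv0 : v ≠ 0 := by
    intro h0; subst h0; rw [oddPart_zero] at hop; exact hm hop.symm
  exact ⟨by rw [← hop]; exact oddPart_exp v, hv0⟩

theorem classSum_eq_mul {l : List Int} {m : Int} (hm : m ≠ 0) :
    classSum l m = m * ((pvClass l m).map (fun v => (2:Int) ^ (pvExp v))).sum := by
  have h1 : classSum l m = ((pvClass l m).map (fun v => m * (2:Int) ^ (pvExp v))).sum := by
    rw [classSum]
    congr 1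
    conv_lhs => rw [show (List.filter (fun v => pvOddPart v == m) l) = pvClass l m from rfl,
      ← List.map_id (pvClass l m)]
    exact List.map_congr_left (fun v hv => ((mem_pvClass_rep hm hv).1 : v = m * 2 ^ (pvExp v)))
  rw [h1, ← List.sum_map_mul_left]

theorem two_pow_sum_pos {L : List Int} (hL : L ≠ []) (h : ∀ x ∈ L, ∃ k : Nat, x = 2 ^ k) :
    1 ≤ L.sum := by
  obtain ⟨x, t, rfl⟩ := List.exists_cons_of_ne_nil hL
  have hx : (1:Int) ≤ x := by
    obtain ⟨k, rfl⟩ := h x (by simp)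
    have := pow_pos (by norm_num : (0:Int) < 2) k
    omega
  have ht : 0 ≤ t.sum := by
    apply List.sum_nonneg
    intro y hy
    obtain ⟨k, rfl⟩ := h y (by simp [hy])
    positivity
  simp only [List.sum_cons]; omega

theorem classSum_ne_zero {l : List Int} {m : Int} (hm : m ≠ 0) (hne : pvClass l m ≠ []) :
    classSum l m ≠ 0 := by
  rw [classSum_eq_mul hm]
  have h1 : 1 ≤ ((pvClass l m).map (fun v => (2:Int) ^ (pvExp v))).sum := by
    apply two_pow_sum_pos (by simpa using hne)
    intro x hx
    obtain ⟨v, _, rfl⟩ := List.mem_map.mp hx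
    exact ⟨pvExp v, rfl⟩
  intro h0
  rcases mul_eq_zero.mp h0 with h | h
  · exact hm h
  · omega

-- ===== proof layer: power loops =====
theorem hiPowAux_spec : ∀ (fuel : Nat) (p t : Int), (t - p).toNat < fuel → 0 < p → p ≤ t →
    (∃ j : Nat, p = 2 ^ j) →
    ∃ b : Nat, pvHiPowAux fuel p t = 2 ^ b ∧ 2 ^ b ≤ t ∧ t < 2 ^ (b + 1) := by
  intro fuel
  induction fuel with
  | zero => intro p t hf; exact absurd hf (by omega)
  | succ f ih =>
    intro p t hf hp hpt hj
    rw [pvHiPowAux]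
    by_cases hc : 2 * p ≤ t
    · rw [if_pos hc]
      obtain ⟨j, rfl⟩ := hj
      exact ih (2 * 2 ^ j) t (by omega) (by positivity) hc ⟨j + 1, by ring⟩
    · rw [if_neg hc]
      obtain ⟨j, rfl⟩ := hj
      refine ⟨j, rfl, hpt, ?_⟩
      rw [pow_succ]
      omega

theorem hiPow_spec (t : Int) (ht : 1 ≤ t) :
    ∃ b : Nat, pvHiPow 1 t = 2 ^ b ∧ 2 ^ b ≤ t ∧ t < 2 ^ (b + 1) := by
  apply hiPowAux_spec (t.natAbs + 1) 1 t (by omega) (by norm_num) ht ⟨0, by norm_num⟩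

theorem loPowAux_spec : ∀ (fuel : Nat) (p t : Int), (t - p).toNat < fuel → 0 < p → 0 < t →
    p ∣ t → (∃ j : Nat, p = 2 ^ j) →
    ∃ b : Nat, pvLoPowAux fuel p t = 2 ^ b ∧ (2 ^ b : Int) ∣ t ∧ ¬ ((2 ^ (b + 1) : Int) ∣ t) := by
  intro fuel
  induction fuel with
  | zero => intro p t hf; exact absurd hf (by omega)
  | succ f ih =>
    intro p t hf hp ht hdvd hj
    rw [pvLoPowAux]
    by_cases hc : PySem.Int.mod t (2 * p) = 0
    · rw [if_pos hc]
      have hdvd2 : (2 * p) ∣ t := (PySem.Int.mod_eq_zero_iff_dvd _ _).mp hc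
      have hle : 2 * p ≤ t := Int.le_of_dvd ht hdvd2
      obtain ⟨j, rfl⟩ := hj
      exact ih (2 * 2 ^ j) t (by omega) (by positivity) ht hdvd2 ⟨j + 1, by ring⟩
    · rw [if_neg hc]
      obtain ⟨j, rfl⟩ := hj
      refine ⟨j, rfl, hdvd, ?_⟩
      intro hd
      apply hc
      refine (PySem.Int.mod_eq_zero_iff_dvd _ _).mpr ?_
      calc (2 * 2 ^ j : Int) = 2 ^ (j + 1) := by ring
      _ ∣ t := hd

theorem loPow_spec (t : Int) (ht : 0 < t) :
    ∃ b : Nat, pvLoPow 1 t = 2 ^ b ∧ (2 ^ b : Int) ∣ t ∧ ¬ ((2 ^ (b + 1) : Int) ∣ t) := by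
  apply loPowAux_spec (t.natAbs + 1) 1 t (by omega) (by norm_num) ht (one_dvd t) ⟨0, by norm_num⟩

theorem pow_bracket_unique {t : Int} {a b : Nat}
    (h1 : 2 ^ a ≤ t) (h2 : t < 2 ^ (a + 1)) (h3 : 2 ^ b ≤ t) (h4 : t < 2 ^ (b + 1)) : a = b := by
  rcases lt_trichotomy a b with h | h | h
  · exfalso
    have : (2:Int) ^ (a + 1) ≤ 2 ^ b := pow_le_pow_right₀ (by norm_num) (by omega)
    omega
  · exact h
  · exfalso
    have : (2:Int) ^ (b + 1) ≤ 2 ^ a := pow_le_pow_right₀ (by norm_num) (by omega)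
    omega

theorem pow_val_unique {t : Int} {a b : Nat}
    (h1 : (2:Int) ^ a ∣ t) (h2 : ¬ ((2:Int) ^ (a + 1) ∣ t))
    (h3 : (2:Int) ^ b ∣ t) (h4 : ¬ ((2:Int) ^ (b + 1) ∣ t)) : a = b := by
  rcases lt_trichotomy a b with h | h | h
  · exact absurd (dvd_trans (pow_dvd_pow 2 (by omega)) h3) h2
  · exact h
  · exact absurd (dvd_trans (pow_dvd_pow 2 (by omega)) h1) h4

theorem sum_range_two_pow (n : Nat) : (∑ i ∈ Finset.range n, (2:Int) ^ i) = 2 ^ n - 1 := by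
  induction n with
  | zero => simp
  | succ n ih => rw [Finset.sum_range_succ, ih]; ring

theorem sum_distinct_pows_le {K : List Nat} (hnd : K.Nodup) {a : Nat} (hle : ∀ k ∈ K, k ≤ a) :
    (K.map (fun k => (2:Int) ^ k)).sum ≤ 2 ^ (a + 1) - 1 := by
  have h1 : (K.map (fun k => (2:Int) ^ k)).sum = ∑ k ∈ K.toFinset, (2:Int) ^ k := by
    rw [List.sum_toFinset _ hnd]
  rw [h1, ← sum_range_two_pow (a + 1)]
  apply Finset.sum_le_sum_of_subset_of_nonneg
  · intro k hk
    simp only [List.mem_toFinset] at hk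
    simp only [Finset.mem_range]
    exact Nat.lt_succ_of_le (hle k hk)
  · intro i _ _
    positivity

theorem exists_max {C : List Int} (h : C ≠ []) : ∃ M ∈ C, ∀ v ∈ C, v ≤ M := by
  cases hM : PySem.List.max? C (fun x => x) with
  | none => exact absurd ((PySem.List.max?_eq_none_iff C _).mp hM) h
  | some M => exact ⟨M, PySem.List.max?_mem hM, fun v hv => PySem.List.max?_isMax hM v hv⟩

theorem sum_exp_eq {m : Int} (hm : m ≠ 0) {C : List Int}
    (hrep : ∀ v ∈ C, v = m * 2 ^ (pvExp v)) {t : Int} (ht : m * t = C.sum) :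
    t = (C.map (fun v => (2:Int) ^ pvExp v)).sum := by
  have hC : C.sum = (C.map (fun v => m * (2:Int) ^ pvExp v)).sum := by
    conv_lhs => rw [← List.map_id C]
    exact congrArg List.sum (List.map_congr_left hrep)
  exact mul_left_cancel₀ hm (by rw [ht, hC, ← List.sum_map_mul_left])

theorem sum_exp_pos {C : List Int} (hne : C ≠ []) :
    1 ≤ (C.map (fun v => (2:Int) ^ pvExp v)).sum := by
  apply two_pow_sum_pos (by simpa using hne)
  intro x hx
  obtain ⟨v, _, rfl⟩ := List.mem_map.mp hx
  exact ⟨_, rfl⟩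

theorem core_pos {m t : Int} (hm : 0 < m) {C : List Int} (hne : C ≠ []) (hnd : C.Nodup)
    (hrep : ∀ v ∈ C, v = m * 2 ^ (pvExp v)) (ht : m * t = C.sum) :
    ∃ M ∈ C, (∀ v ∈ C, v ≤ M) ∧ M = m * pvHiPow 1 t := by
  have hTt := sum_exp_eq (ne_of_gt hm) hrep ht
  have hT1 := sum_exp_pos hne
  rw [← hTt] at hT1
  obtain ⟨M, hMmem, hMmax⟩ := exists_max hne
  have hMrep := hrep M hMmem
  have hub : ∀ v ∈ C, pvExp v ≤ pvExp M := by
    intro v hv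
    have h1 : m * 2 ^ (pvExp v) ≤ m * 2 ^ (pvExp M) := by
      rw [← hrep v hv, ← hMrep]; exact hMmax v hv
    exact (pow_le_pow_iff_right₀ (by norm_num)).mp (le_of_mul_le_mul_left h1 hm)
  have hKnd : (C.map pvExp).Nodup := by
    refine List.Nodup.map_on ?_ hnd
    intro x hx y hy hxy
    rw [hrep x hx, hrep y hy, hxy]
  have hle : t ≤ 2 ^ (pvExp M + 1) - 1 := by
    have h2 := sum_distinct_pows_le hKnd (a := pvExp M) ?_
    · rw [List.map_map] at h2
      rw [hTt]
      exact h2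
    · intro k hk
      obtain ⟨v, hv, rfl⟩ := List.mem_map.mp hk
      exact hub v hv
  have hlo : 2 ^ (pvExp M) ≤ t := by
    rw [hTt]
    refine List.single_le_sum ?_ _ ?_
    · intro x hx
      obtain ⟨v, _, rfl⟩ := List.mem_map.mp hx
      positivity
    · exact List.mem_map.mpr ⟨M, hMmem, rfl⟩
  obtain ⟨b, hb, hb1, hb2⟩ := hiPow_spec t (by omega)
  have hab : pvExp M = b := pow_bracket_unique hlo (by omega) hb1 hb2
  exact ⟨M, hMmem, hMmax, by rw [hb, ← hab]; exact hMrep⟩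

theorem core_neg {m t : Int} (hm : m < 0) {C : List Int} (hne : C ≠ []) (hnd : C.Nodup)
    (hrep : ∀ v ∈ C, v = m * 2 ^ (pvExp v)) (ht : m * t = C.sum) :
    ∃ M ∈ C, (∀ v ∈ C, v ≤ M) ∧ M = m * pvLoPow 1 t := by
  have hTt := sum_exp_eq (ne_of_lt hm) hrep ht
  have hT1 := sum_exp_pos hne
  rw [← hTt] at hT1
  obtain ⟨M, hMmem, hMmax⟩ := exists_max hne
  have hMrep := hrep M hMmem
  have hlb : ∀ v ∈ C, pvExp M ≤ pvExp v := by
    intro v hv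
    have h1 : m * 2 ^ (pvExp v) ≤ m * 2 ^ (pvExp M) := by
      rw [← hrep v hv, ← hMrep]; exact hMmax v hv
    have h2 : (2:Int) ^ (pvExp M) ≤ 2 ^ (pvExp v) := by
      rcases le_or_gt ((2:Int) ^ (pvExp M)) (2 ^ (pvExp v)) with h' | h'
      · exact h'
      · exfalso
        have := mul_lt_mul_of_neg_left h' hm
        omega
    exact (pow_le_pow_iff_right₀ (by norm_num)).mp h2
  have hstrict : ∀ v ∈ C.erase M, pvExp M + 1 ≤ pvExp v := by
    intro v hv
    rw [List.Nodup.mem_erase_iff hnd] at hv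
    obtain ⟨hvne, hvC⟩ := hv
    have h1 := hlb v hvC
    rcases Nat.eq_or_lt_of_le h1 with h2 | h2
    · exfalso
      apply hvne
      rw [hrep v hvC, hMrep, ← h2]
    · omega
  have hperm := List.perm_cons_erase hMmem
  have hsplit : t = 2 ^ (pvExp M) + ((C.erase M).map (fun v => (2:Int) ^ pvExp v)).sum := by
    rw [hTt, List.Perm.sum_eq (hperm.map (fun v => (2:Int) ^ pvExp v))]
    simp
  have hD : (2:Int) ^ (pvExp M + 1) ∣ ((C.erase M).map (fun v => (2:Int) ^ pvExp v)).sum := by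
    apply List.dvd_sum
    intro x hx
    obtain ⟨v, hv, rfl⟩ := List.mem_map.mp hx
    exact pow_dvd_pow 2 (hstrict v hv)
  have hdvd : (2:Int) ^ (pvExp M) ∣ t := by
    rw [hsplit]
    exact dvd_add dvd_rfl (dvd_trans (pow_dvd_pow 2 (by omega)) hD)
  have hndvd : ¬ ((2:Int) ^ (pvExp M + 1) ∣ t) := by
    intro hc
    have h1 : (2:Int) ^ (pvExp M + 1) ∣ 2 ^ (pvExp M) := by
      have := dvd_sub hc hD
      rw [hsplit] at this
      simpa using this
    have h2 := Int.le_of_dvd (by positivity) h1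
    have h3 : (2:Int) ^ (pvExp M) < 2 ^ (pvExp M + 1) := by
      rw [pow_succ]
      have := pow_pos (by norm_num : (0:Int) < 2) (pvExp M)
      omega
    omega
  obtain ⟨b, hb, hb1, hb2⟩ := loPow_spec t (by omega)
  have hab : pvExp M = b := pow_val_unique hdvd hndvd hb1 hb2
  exact ⟨M, hMmem, hMmax, by rw [hb, ← hab]; exact hMrep⟩

-- ===== proof layer: the best-accumulator loop =====
def pvVal (mt : Int × Int) : Int :=
  mt.1 * (if 0 < mt.1 then pvHiPow 1 mt.2 else pvLoPow 1 mt.2)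

theorem pvBestStep_some (b : Int) (mt : Int × Int) :
    pvBestStep (some b) mt = some (if b < pvVal mt then pvVal mt else b) := by
  simp only [pvBestStep, pvVal]
  split <;> split <;> rfl

theorem bestFold (l : List (Int × Int)) (b0 : Option Int) (hne : b0 ≠ none ∨ l ≠ []) :
    ∃ x, l.foldl pvBestStep b0 = some x ∧ x ∈ b0.toList ++ l.map pvVal ∧
      ∀ y ∈ b0.toList ++ l.map pvVal, y ≤ x := by
  induction l generalizing b0 with
  | nil =>
    rcases hne with hb | hl
    · cases b0 with
      | none => exact absurd rfl hb
      | some b => exact ⟨b, rfl, by simp, by simp⟩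
    · exact absurd rfl hl
  | cons mt t ih =>
    simp only [List.foldl_cons]
    have step : ∃ z, pvBestStep b0 mt = some z ∧ pvVal mt ≤ z ∧
        (∀ y ∈ b0.toList, y ≤ z) ∧ (z = pvVal mt ∨ z ∈ b0.toList) := by
      cases b0 with
      | none => exact ⟨pvVal mt, rfl, le_refl _, by simp, Or.inl rfl⟩
      | some b =>
        rw [pvBestStep_some]
        by_cases hb : b < pvVal mt
        · exact ⟨pvVal mt, by rw [if_pos hb], le_refl _, by simp; omega, Or.inl rfl⟩
        · exact ⟨b, by rw [if_neg hb], by omega, by simp, Or.inr (by simp)⟩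
    obtain ⟨z, hstep, hz1, hz2, hz3⟩ := step
    rw [hstep]
    obtain ⟨x, hx, hxmem, hxub⟩ := ih (some z) (Or.inl (by simp))
    refine ⟨x, hx, ?_, ?_⟩
    · simp only [Option.toList_some, List.cons_append, List.mem_cons, List.nil_append] at hxmem
      rcases hxmem with rfl | hxm
      · rcases hz3 with rfl | hzb
        · simp
        · simp only [List.mem_append, List.map_cons]
          exact Or.inl hzb
      · simp only [List.mem_append, List.map_cons, List.mem_cons] at hxm ⊢
        tauto
    · intro y hy
      have hzx : z ≤ x := hxub z (by simp)
      simp only [List.mem_append, List.map_cons, List.mem_cons] at hy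
      rcases hy with hyb | rfl | hyt
      · exact le_trans (hz2 y hyb) hzx
      · exact le_trans hz1 hzx
      · exact hxub y (by simp [hyt])

-- ===== proof layer: assembly =====
theorem key_max {R : List Int} (hRnd : R.Nodup) {m t : Int} (hm : m ≠ 0)
    (ht : m * t = classSum R m) (hCne : pvClass R m ≠ []) :
    ∃ M ∈ pvClass R m, (∀ v ∈ pvClass R m, v ≤ M) ∧ M = pvVal (m, t) := by
  have hCnd : (pvClass R m).Nodup := hRnd.filter _
  have hrep : ∀ v ∈ pvClass R m, v = m * 2 ^ (pvExp v) :=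
    fun v hv => (mem_pvClass_rep hm hv).1
  have hts : m * t = (pvClass R m).sum := ht
  rcases lt_trichotomy m 0 with hlt | h0 | hgt
  · obtain ⟨M, h1, h2, h3⟩ := core_neg hlt hCne hCnd hrep hts
    refine ⟨M, h1, h2, ?_⟩
    rw [h3, pvVal]
    simp [not_lt_of_gt hlt]
  · exact absurd h0 hm
  · obtain ⟨M, h1, h2, h3⟩ := core_pos hgt hCne hCnd hrep hts
    refine ⟨M, h1, h2, ?_⟩
    rw [h3, pvVal]
    simp [hgt]

theorem classSum_def (l : List Int) (m : Int) : classSum l m = (pvClass l m).sum := rfl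

theorem filter_l0_class {arr : List Int} {m : Int} (hm : m ≠ 0) :
    (arr.filter (fun v => !(v == 0))).filter (fun v => pvOddPart v == m) = pvClass arr m := by
  rw [List.filter_filter, pvClass]
  apply List.filter_congr
  intro v _
  by_cases hv : pvOddPart v = m
  · have hv0 : v ≠ 0 := by
      intro h0; subst h0; rw [oddPart_zero] at hv; exact hm hv.symm
    simp [hv, hv0]
  · simp [hv]

theorem dict_val_classSum {arr : List Int} {m : Int} (hm : m ≠ 0) :
    m * ((arr.filter (fun v => !(v == 0))).foldl pvIns PySem.Dict.empty).getD m 0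
      = classSum arr m := by
  rw [getD_foldl_pvIns, PySem.Dict.getD_empty, zero_add, filter_l0_class hm]
  rw [← List.sum_map_mul_left, classSum_def]
  congr 1
  conv_rhs => rw [← List.map_id (pvClass arr m)]
  apply List.map_congr_left
  intro v hv
  obtain ⟨hrep, hv0⟩ := mem_pvClass_rep hm hv
  have hop : pvOddPart v = m := (mem_pvClass.mp hv).2
  have hdvd : m ∣ v := by rw [hrep]; exact Dvd.intro _ rfl
  have hmod : PySem.Int.mod v m = 0 := (PySem.Int.mod_eq_zero_iff_dvd v m).mpr hdvd
  have h2 := PySem.Int.floordiv_mul_add_mod v m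
  rw [hmod, add_zero] at h2
  rw [hop]
  simp only [id_eq]
  rw [mul_comm]
  exact h2

theorem zero_flag (arr : List Int) : (arr.any (fun v => v == 0)) = true ↔ (0:Int) ∈ arr := by
  rw [List.any_eq_true]
  constructor
  · rintro ⟨v, hv, he⟩
    simpa using (by simpa using he : v = 0) ▸ hv
  · intro h; exact ⟨0, h, by simp⟩

theorem main_eq {arr : List Int} (h : arr ≠ []) :
    obtain_max_number arr = obtain_max_number_alt arr := by
  obtain ⟨hRne, hcs, hzz, hcnt, hA⟩ := A_characterization h
  set R := pvWhile (arr.length + 1) arr 0 with hR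
  have hRnd : R.Nodup := List.nodup_iff_count_le_one.mpr hcnt
  obtain ⟨Ma, hMaMem, hMaMax⟩ := exists_max hRne
  have hAval : obtain_max_number arr = Ma := by
    rw [hA]
    cases hM : PySem.List.max? R (fun x => x) with
    | none => rw [PySem.List.max?_eq_none_iff] at hM; exact absurd hM hRne
    | some M =>
      have hMem := PySem.List.max?_mem hM
      have hMax := PySem.List.max?_isMax hM
      simp only [Option.getD_some]
      exact le_antisymm (hMaMax M hMem) (hMax Ma hMaMem)
  -- B-side structure
  set l0 := arr.filter (fun v => !(v == 0)) with hl0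
  set D := l0.foldl pvIns PySem.Dict.empty with hDdef
  have hst : arr.foldl pvTally (PySem.Dict.empty, false) = (D, arr.any (fun v => v == 0)) := by
    rw [foldl_pvTally, foldl_ite_filter]
    simp only [Bool.false_or]
    rw [hDdef, hl0]
  set b0 : Option Int := if arr.any (fun v => v == 0) then some 0 else none with hb0
  have hBval : obtain_max_number_alt arr = (D.items.foldl pvBestStep b0).getD 0 := by
    rw [obtain_max_number_alt, hst]
  have hKnd : D.keys.Nodup := nodup_keys_foldl_pvIns l0
  have hitems : D.items = D.keys.map (fun k => (k, D.getD k 0)) :=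
    PySem.Dict.items_eq_map_keys D hKnd 0
  have hmemK : ∀ m : Int, m ∈ D.keys ↔ ∃ v ∈ arr, v ≠ 0 ∧ pvOddPart v = m := by
    intro m
    rw [hDdef, keys_foldl_pvIns, PySem.Set.mem_ofList, List.mem_map]
    constructor
    · rintro ⟨v, hv, rfl⟩
      rw [hl0, List.mem_filter] at hv
      exact ⟨v, hv.1, by simpa using hv.2, rfl⟩
    · rintro ⟨v, hv, hv0, rfl⟩
      exact ⟨v, by rw [hl0, List.mem_filter]; exact ⟨hv, by simpa using hv0⟩, rfl⟩
  have hKne0 : ∀ m ∈ D.keys, m ≠ 0 := by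
    intro m hm
    obtain ⟨v, _, hv0, rfl⟩ := (hmemK m).mp hm
    exact oddPart_ne_zero hv0
  -- the candidate that each key m contributes is the maximum of class m in R
  have hkey : ∀ m ∈ D.keys, ∃ M ∈ pvClass R m,
      (∀ v ∈ pvClass R m, v ≤ M) ∧ M = pvVal (m, D.getD m 0) := by
    intro m hm
    have hm0 := hKne0 m hm
    have hts : m * D.getD m 0 = classSum R m := by
      rw [hDdef, dict_val_classSum hm0, hcs m]
    apply key_max hRnd hm0 hts
    -- class of m in R is nonempty
    obtain ⟨v, hv, hv0, rfl⟩ := (hmemK m).mp hm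
    have hCarr : pvClass arr (pvOddPart v) ≠ [] := by
      intro hnil
      have : v ∈ pvClass arr (pvOddPart v) := mem_pvClass.mpr ⟨hv, rfl⟩
      rw [hnil] at this
      simp at this
    have h1 : classSum R (pvOddPart v) ≠ 0 := by
      rw [hcs]
      exact classSum_ne_zero hm0 hCarr
    intro hnil
    rw [classSum_def, hnil] at h1
    simp at h1
  -- membership of keys for every nonzero element of R
  have hRkey : ∀ v ∈ R, v ≠ 0 → pvOddPart v ∈ D.keys := by
    intro v hv hv0
    have hm0 : pvOddPart v ≠ 0 := oddPart_ne_zero hv0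
    have hCne : pvClass R (pvOddPart v) ≠ [] := by
      intro hnil
      have : v ∈ pvClass R (pvOddPart v) := mem_pvClass.mpr ⟨hv, rfl⟩
      rw [hnil] at this; simp at this
    have h1 : classSum arr (pvOddPart v) ≠ 0 := by
      rw [← hcs]
      exact classSum_ne_zero hm0 hCne
    have hCarr : pvClass arr (pvOddPart v) ≠ [] := by
      intro hnil
      rw [classSum_def, hnil] at h1; simp at h1
    obtain ⟨w, hw⟩ := List.exists_mem_of_ne_nil _ hCarr
    obtain ⟨hwa, hwop⟩ := mem_pvClass.mp hw
    have hw0 : w ≠ 0 := (mem_pvClass_rep hm0 hw).2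
    exact (hmemK _).mpr ⟨w, hwa, hw0, hwop⟩
  -- candidates
  set cands := b0.toList ++ D.items.map pvVal with hcands
  have halpha : ∀ c ∈ cands, c ∈ R := by
    intro c hc
    rw [hcands, List.mem_append] at hc
    rcases hc with hc | hc
    · by_cases hflag : arr.any (fun v => v == 0) = true
      · rw [hb0, if_pos hflag] at hc
        simp only [Option.toList_some, List.mem_singleton] at hc
        subst hc
        exact hzz.mpr ((zero_flag arr).mp hflag)
      · rw [hb0, if_neg hflag] at hc
        simp at hc
    · obtain ⟨mt, hmt, rfl⟩ := List.mem_map.mp hc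
      rw [hitems] at hmt
      obtain ⟨m, hm, rfl⟩ := List.mem_map.mp hmt
      obtain ⟨M, hMC, _, hMval⟩ := hkey m hm
      rw [← hMval]
      exact (mem_pvClass.mp hMC).1
  have hbeta : ∀ v ∈ R, ∃ c ∈ cands, v ≤ c := by
    intro v hv
    by_cases hv0 : v = 0
    · subst hv0
      have hflag : arr.any (fun v => v == 0) = true := (zero_flag arr).mpr (hzz.mp hv)
      refine ⟨0, ?_, le_refl 0⟩
      rw [hcands, List.mem_append, hb0, if_pos hflag]
      simp
    · have hm := hRkey v hv hv0
      obtain ⟨M, hMC, hMmax, hMval⟩ := hkey _ hm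
      refine ⟨M, ?_, hMmax v (mem_pvClass.mpr ⟨hv, rfl⟩)⟩
      rw [hcands, List.mem_append]
      right
      rw [hMval, hitems]
      exact List.mem_map.mpr ⟨(pvOddPart v, D.getD (pvOddPart v) 0),
        List.mem_map.mpr ⟨pvOddPart v, hm, rfl⟩, rfl⟩
  have hne2 : b0 ≠ none ∨ D.items ≠ [] := by
    obtain ⟨v, hv⟩ := List.exists_mem_of_ne_nil _ h
    by_cases hv0 : v = 0
    · left
      subst hv0
      rw [hb0, if_pos ((zero_flag arr).mpr hv)]
      simp
    · right
      have hm : pvOddPart v ∈ D.keys := (hmemK _).mpr ⟨v, hv, hv0, rfl⟩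
      intro hnil
      rw [hitems] at hnil
      rw [List.map_eq_nil_iff.mp hnil] at hm
      simp at hm
  obtain ⟨x, hxeq, hxmem, hxub⟩ := bestFold D.items b0 hne2
  have hxR : x ∈ R := halpha x hxmem
  obtain ⟨c, hcmem, hMac⟩ := hbeta Ma hMaMem
  have hxMa : x = Ma := le_antisymm (hMaMax x hxR) (le_trans hMac (hxub c hcmem))
  rw [hAval, hBval, hxeq, Option.getD_some, hxMa]


-- ===== VERDICT (by name: the statement is the Claim_ definition above) =====
theorem obtain_max_number_spec : Claim_equal_obtain_max_number := by
  intro arr _ hpre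
  unfold Spec_obtain_max_number
  exact main_eq hpre
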